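-- pv_equiv track=rewrite | github.com/jjsullivan5196/steganosaurus | pillowTest.py | makeSpecificGrey
-- ===== SOURCE A (Python) =====
-- def sumList(list):
-- 	total = 0
-- 	for e in list:
-- 		total += e
-- 	return total
--
-- def makeSpecificGrey(value):
-- 	list = [0, 0, 0]
-- 	ind = 0
-- 	while(sumList(list) < value):
-- 		list[ind] += 1
-- 		ind += 1
-- 		if(ind > 2):
-- 			ind = 0
-- 	return tuple(list)
-- ===== SOURCE B (Python) =====
-- def makeSpecificGrey(value):
--     v = value if value > 0 else 0
--     q, r = divmod(v, 3)
--     return (q + (1 if r > 0 else 0), q + (1 if r > 1 else 0), q)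
-- ===== Notes on version B (the rewrite author's own statement) =====
-- stated objective: faster
-- what changed: Replaced the round-robin increment loop (one iteration per unit of value) by a closed-form divmod distribution of value over the three colour channels.
import Mathlib
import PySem

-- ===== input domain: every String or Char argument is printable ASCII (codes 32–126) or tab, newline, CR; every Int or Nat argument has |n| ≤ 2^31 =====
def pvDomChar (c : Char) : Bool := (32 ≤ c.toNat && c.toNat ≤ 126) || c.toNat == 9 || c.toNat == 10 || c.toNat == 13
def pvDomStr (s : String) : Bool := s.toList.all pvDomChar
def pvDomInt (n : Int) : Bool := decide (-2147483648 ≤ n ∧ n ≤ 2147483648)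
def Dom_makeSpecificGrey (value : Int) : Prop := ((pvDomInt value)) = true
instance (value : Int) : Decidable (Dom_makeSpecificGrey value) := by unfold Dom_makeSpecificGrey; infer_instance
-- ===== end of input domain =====

-- B replaces A's one-increment-per-unit loop by a closed-form divmod distribution (O(1)).

-- ===== PORT A =====
-- sumList: total = 0; for e in list: total += e
def sumListA (l : List Int) : Int := l.foldl (fun total e => total + e) 0

-- the while loop; fuel bounds the number of iterations (value.toNat + 1 always suffices:
-- the sum grows by 1 each iteration). ind is always 0, 1 or 2, so ind.toNat is exact here.
def greyLoop (value : Int) (l : List Int) (ind : Int) (fuel : Nat) : List Int :=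
  match fuel with
  | 0 => l
  | fuel + 1 =>
    if sumListA l < value then
      let l' := l.set ind.toNat (l.getD ind.toNat 0 + 1)
      let ind' := ind + 1
      let ind'' := if ind' > 2 then 0 else ind'
      greyLoop value l' ind'' fuel
    else l

def makeSpecificGrey (value : Int) : List Int :=
  greyLoop value [0, 0, 0] 0 (value.toNat + 1)

-- ===== PORT B =====
def makeSpecificGrey_alt (value : Int) : List Int :=
  let v := if value > 0 then value else 0
  let q := PySem.Int.floordiv v 3
  let r := PySem.Int.mod v 3
  [q + (if r > 0 then 1 else 0), q + (if r > 1 then 1 else 0), q]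

-- ===== PRECONDITION & SPEC =====
def Spec_makeSpecificGrey (value : Int) (out : List Int) : Prop := out = makeSpecificGrey_alt value
instance (value : Int) (out : List Int) : Decidable (Spec_makeSpecificGrey value out) := by unfold Spec_makeSpecificGrey; infer_instance

-- ===== CLAIM (what is proved, stated in full; the proofs are below) =====
def Claim_equal_makeSpecificGrey : Prop := ∀ (value : Int), Dom_makeSpecificGrey value → Spec_makeSpecificGrey value (makeSpecificGrey value)

-- ===== LEMMAS AND PROOFS =====

-- canonical state after n iterations of A's loop
def distN (n : Nat) : List Int :=
  [(n / 3 : Nat) + (if n % 3 > 0 then 1 else 0),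
   (n / 3 : Nat) + (if n % 3 > 1 then 1 else 0),
   (n / 3 : Nat)]

theorem sum_distN (n : Nat) : sumListA (distN n) = (n : Int) := by
  have h3 := Nat.div_add_mod n 3
  rcases (by omega : n % 3 = 0 ∨ n % 3 = 1 ∨ n % 3 = 2) with h | h | h <;>
    simp [sumListA, distN, h] <;> omega

theorem step_distN (n : Nat) :
    (distN n).set ((n % 3 : Nat) : Int).toNat ((distN n).getD ((n % 3 : Nat) : Int).toNat 0 + 1)
      = distN (n + 1) := by
  rcases (by omega : n % 3 = 0 ∨ n % 3 = 1 ∨ n % 3 = 2) with h | h | h <;>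
    · have hd : (n + 1) / 3 = n / 3 + (if n % 3 = 2 then 1 else 0) := by split_ifs <;> omega
      have hm : (n + 1) % 3 = if n % 3 = 2 then 0 else n % 3 + 1 := by split_ifs <;> omega
      simp [distN, h, hd, hm, List.set, List.getD]

theorem ind_step (n : Nat) :
    (if ((n % 3 : Nat) : Int) + 1 > 2 then (0 : Int) else ((n % 3 : Nat) : Int) + 1)
      = (((n + 1) % 3 : Nat) : Int) := by
  rcases (by omega : n % 3 = 0 ∨ n % 3 = 1 ∨ n % 3 = 2) with h | h | h <;>
    · have : (n + 1) % 3 = if n % 3 = 2 then 0 else n % 3 + 1 := by split_ifs <;> omega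
      simp [h, this]

theorem greyLoop_distN (value : Int) (fuel n : Nat) (hfuel : value ≤ (n : Int) + fuel) :
    greyLoop value (distN n) ((n % 3 : Nat) : Int) fuel = distN (max value.toNat n) := by
  induction fuel generalizing n with
  | zero =>
    have : value ≤ (n : Int) := by simpa using hfuel
    have : max value.toNat n = n := by omega
    simp [greyLoop, this]
  | succ fuel ih =>
    by_cases h : (n : Int) < value
    · have hmax : max value.toNat (n + 1) = max value.toNat n := by omega
      simp only [greyLoop, sum_distN, h, if_pos, step_distN, ind_step]
      rw [ih (n + 1) (by push_cast; omega), hmax]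
    · have hmax : max value.toNat n = n := by omega
      simp [greyLoop, sum_distN, h, hmax]

theorem alt_eq_distN (value : Int) : makeSpecificGrey_alt value = distN value.toNat := by
  by_cases h : value > 0
  · have hv : value = ((value.toNat : Nat) : Int) := by omega
    simp only [makeSpecificGrey_alt, if_pos h]
    rw [hv, PySem.Int.floordiv_eq_ediv_of_pos (by norm_num), PySem.Int.mod_eq_emod_of_pos (by norm_num)]
    simp only [distN, Int.toNat_natCast, List.cons.injEq, and_true]
    refine ⟨?_, ?_, ?_⟩ <;> (try split_ifs) <;> omega
  · have hv : value.toNat = 0 := by omega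
    simp [makeSpecificGrey_alt, h, hv, distN, PySem.Int.floordiv, PySem.Int.mod]

-- ===== VERDICT (by name: the statement is the Claim_ definition above) =====
theorem makeSpecificGrey_spec : Claim_equal_makeSpecificGrey := by
  intro value _
  show makeSpecificGrey value = makeSpecificGrey_alt value
  have h0 : ((0 % 3 : Nat) : Int) = (0 : Int) := by norm_num
  have := greyLoop_distN value (value.toNat + 1) 0 (by push_cast; omega)
  simp only [Nat.zero_mod, Nat.cast_zero] at this
  have hd0 : distN 0 = [0, 0, 0] := by simp [distN]
  rw [makeSpecificGrey, ← hd0, this, alt_eq_distN]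
  congr 1
  omega
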